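-- pv_equiv track=rewrite | github.com/Donthularohith/AI-agent | policy/opa_client.py | _match_resource_pattern
-- ===== SOURCE A (Python) =====
-- def _match_resource_pattern(resource: str, pattern: str) -> bool:
--     """
--     Match a resource string against a glob-like pattern.
--     Supports * as wildcard.
--     """
--     if pattern == "*":
--         return True
--
--     pattern_parts = pattern.split(":")
--     resource_parts = resource.split(":")
--
--     for i, p_part in enumerate(pattern_parts):
--         if p_part == "*":
--             return True  # Wildcard matches everything after
--         if i >= len(resource_parts):
--             return False
--         if p_part != resource_parts[i]:
--             return False
--
--     return len(resource_parts) == len(pattern_parts)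
-- ===== SOURCE B (Python) =====
-- def _match_resource_pattern(resource: str, pattern: str) -> bool:
--     """Match a resource string against a colon-segmented glob pattern (find-then-compare-slices)."""
--     if pattern == "*":
--         return True
--     pattern_parts = pattern.split(":")
--     resource_parts = resource.split(":")
--     if "*" in pattern_parts:
--         i = pattern_parts.index("*")
--         return pattern_parts[:i] == resource_parts[:i]
--     return pattern_parts == resource_parts
-- ===== Notes on version B (the rewrite author's own statement) =====
-- stated objective: simpler
-- what changed: Replaces the interleaved indexed loop (wildcard test, bounds test, segment test per iteration, plus a trailing length check) by a find-then-compare decomposition: locate the first '*' segment and compare list slices up to it, or compare the whole split lists when no '*' occurs.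
import Mathlib
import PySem

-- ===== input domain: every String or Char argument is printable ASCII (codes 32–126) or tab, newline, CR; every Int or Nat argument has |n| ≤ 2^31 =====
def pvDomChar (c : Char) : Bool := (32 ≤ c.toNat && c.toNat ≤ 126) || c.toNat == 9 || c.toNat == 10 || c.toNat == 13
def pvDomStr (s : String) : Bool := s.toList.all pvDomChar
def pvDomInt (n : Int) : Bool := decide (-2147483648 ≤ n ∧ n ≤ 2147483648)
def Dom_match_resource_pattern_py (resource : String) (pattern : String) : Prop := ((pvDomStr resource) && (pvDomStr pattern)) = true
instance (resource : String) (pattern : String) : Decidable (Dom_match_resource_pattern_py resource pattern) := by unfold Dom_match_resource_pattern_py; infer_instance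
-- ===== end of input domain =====

-- B replaces A's interleaved indexed loop by a find-the-'*'-then-compare-slices decomposition (objective: simpler).

-- ===== PORT A =====
-- the 'for i, p_part in enumerate(pattern_parts)' loop with its three early returns;
-- resource_parts[i] is read with getD, exact here since the preceding branch guarantees i < resource_parts.length
def mrpLoopA (resource_parts : List String) (pattern_parts : List String) (i : Nat) : Option Bool :=
  match pattern_parts with
  | [] => none
  | p_part :: rest =>
    if p_part = "*" then some true
    else if resource_parts.length ≤ i then some false
    else if p_part ≠ resource_parts.getD i "" then some false
    else mrpLoopA resource_parts rest (i + 1)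

def match_resource_pattern_py (resource : String) (pattern : String) : Bool :=
  if pattern = "*" then true
  else
    let pattern_parts := (PySem.Str.split? pattern ":").getD []
    let resource_parts := (PySem.Str.split? resource ":").getD []
    match mrpLoopA resource_parts pattern_parts 0 with
    | some b => b
    | none => decide (resource_parts.length = pattern_parts.length)

-- ===== PORT B =====
def match_resource_pattern_py_alt (resource : String) (pattern : String) : Bool :=
  if pattern = "*" then true
  else
    let pattern_parts := (PySem.Str.split? pattern ":").getD []
    let resource_parts := (PySem.Str.split? resource ":").getD []
    if pattern_parts.contains "*" then
      -- pattern_parts.index("*"): the guard guarantees membership, so it is the first index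
      let i := pattern_parts.idxOf "*"
      decide (pattern_parts.take i = resource_parts.take i)
    else decide (pattern_parts = resource_parts)

-- ===== PRECONDITION & SPEC =====
def Spec_match_resource_pattern_py (resource : String) (pattern : String) (out : Bool) : Prop := out = match_resource_pattern_py_alt resource pattern
instance (resource : String) (pattern : String) (out : Bool) : Decidable (Spec_match_resource_pattern_py resource pattern out) := by unfold Spec_match_resource_pattern_py; infer_instance

-- ===== CLAIM (what is proved, stated in full; the proofs are below) =====
def Claim_equal_match_resource_pattern_py : Prop := ∀ (resource : String) (pattern : String), Dom_match_resource_pattern_py resource pattern → Spec_match_resource_pattern_py resource pattern (match_resource_pattern_py resource pattern)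

-- ===== LEMMAS AND PROOFS =====

-- A's loop (finished with A's trailing length check) equals B's find-then-compare on the
-- remaining pattern segments against the resource segments from position i on.
theorem mrpLoopA_key (pp rp : List String) (i : Nat) (h : i ≤ rp.length) :
    (match mrpLoopA rp pp i with
     | some b => b
     | none => decide (rp.length = i + pp.length))
    = (if pp.contains "*" then
         decide (pp.take (pp.idxOf "*") = (rp.drop i).take (pp.idxOf "*"))
       else decide (pp = rp.drop i)) := by
  induction pp generalizing i with
  | nil =>
    have : ([] = rp.drop i) ↔ rp.length = i := by
      rw [eq_comm, List.drop_eq_nil_iff]; omega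
    simp [mrpLoopA, this]
  | cons p rest ih =>
    by_cases hp : p = "*"
    · subst hp
      simp [mrpLoopA]
    · have hbeq : ("*" == p) = false := beq_eq_false_iff_ne.mpr (Ne.symm hp)
      have hbeq' : (p == "*") = false := beq_eq_false_iff_ne.mpr hp
      have hcont : (p :: rest).contains "*" = rest.contains "*" := by
        rw [List.contains_cons, hbeq, Bool.false_or]
      have hidx : List.idxOf "*" (p :: rest) = List.idxOf "*" rest + 1 := by
        simp [List.idxOf_cons, hbeq']
      have hunf : mrpLoopA rp (p :: rest) i =
          (if p = "*" then some true
           else if rp.length ≤ i then some false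
           else if p ≠ rp.getD i "" then some false
           else mrpLoopA rp rest (i + 1)) := rfl
      by_cases hi : rp.length ≤ i
      · have hdrop : rp.drop i = [] := List.drop_eq_nil_of_le hi
        have hA : mrpLoopA rp (p :: rest) i = some false := by
          rw [hunf, if_neg hp, if_pos hi]
        rw [hA, hcont, hidx, hdrop]
        by_cases hs : rest.contains "*" = true <;> simp [hs]
      · have hi' : i < rp.length := by omega
        have hdrop : rp.drop i = rp[i] :: rp.drop (i + 1) := List.drop_eq_getElem_cons hi'
        have hget : rp.getD i "" = rp[i] := List.getD_eq_getElem rp "" hi'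
        by_cases hq : p = rp.getD i ""
        · have hrec : mrpLoopA rp (p :: rest) i = mrpLoopA rp rest (i + 1) := by
            rw [hunf, if_neg hp, if_neg hi, if_neg (not_not_intro hq)]
          have hpeq : p = rp[i] := hq.trans hget
          have hlen : i + (p :: rest).length = (i + 1) + rest.length := by
            simp; omega
          rw [hrec, hlen, ih (i + 1) hi', hcont, hidx, hdrop]
          by_cases hs : rest.contains "*" = true
          · rw [if_pos hs, if_pos hs, List.take_succ_cons, List.take_succ_cons,
              decide_eq_decide]
            simp [hpeq]
          · rw [if_neg hs, if_neg hs, decide_eq_decide]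
            exact ⟨fun e => by rw [hpeq, e], fun e => (List.cons_eq_cons.mp e).2⟩
        · have hA : mrpLoopA rp (p :: rest) i = some false := by
            rw [hunf, if_neg hp, if_neg hi, if_pos hq]
          have hpn : p ≠ rp[i] := fun e => hq (e.trans hget.symm)
          rw [hA, hcont, hidx, hdrop]
          by_cases hs : rest.contains "*" = true
          · rw [if_pos hs, List.take_succ_cons, List.take_succ_cons, eq_comm,
              decide_eq_false_iff_not]
            intro e
            exact hpn (List.cons.injEq .. ▸ e).1
          · rw [if_neg hs, eq_comm, decide_eq_false_iff_not]
            intro e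
            exact hpn (List.cons_eq_cons.mp e).1

-- ===== VERDICT (by name: the statement is the Claim_ definition above) =====
theorem match_resource_pattern_py_spec : Claim_equal_match_resource_pattern_py := by
  intro resource pattern _
  unfold Spec_match_resource_pattern_py match_resource_pattern_py match_resource_pattern_py_alt
  by_cases hstar : pattern = "*"
  · simp [hstar]
  · simp only [hstar, if_false]
    have := mrpLoopA_key ((PySem.Str.split? pattern ":").getD [])
      ((PySem.Str.split? resource ":").getD []) 0 (Nat.zero_le _)
    simpa using this
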